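-- pv_equiv track=rewrite | github.com/ycanerol/pymer | readks.py | generate_clusternumbers
-- ===== SOURCE A (Python) =====
-- def generate_clusternumbers(channels):
--     """
--     Generate consecutive cluster numbers for each channel, similar
--     to IGOR cluster naming.
--     """
--     ch_prev = None
--     cl_prev = 0
--     clusters = []
--     for ch in channels:
--         if ch == ch_prev:
--             cl_prev += 1
--             clusters.append(cl_prev)
--         else:
--             cl_prev = 1
--             clusters.append(cl_prev)
--         ch_prev = ch
--     return clusters
-- ===== SOURCE B (Python) =====
-- def generate_clusternumbers(channels):
--     """
--     Generate consecutive cluster numbers for each channel, similar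
--     to IGOR cluster naming.
--     """
--     # Pass 1: group the channels into runs of consecutive equal values,
--     # keeping only (value, run length).
--     runs = []
--     for ch in channels:
--         if runs and runs[-1][0] == ch:
--             runs[-1][1] += 1
--         else:
--             runs.append([ch, 1])
--     # Pass 2: emit 1..n for each run.
--     out = []
--     for _, n in runs:
--         out.extend(range(1, n + 1))
--     return out
-- ===== Notes on version B (the rewrite author's own statement) =====
-- stated objective: alternative
-- what changed: Replaces the previous-value/counter tracking loop with a two-pass decomposition: first group the input into runs of consecutive equal channels with their lengths, then emit range(1, n+1) for each run.
import Mathlib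
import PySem

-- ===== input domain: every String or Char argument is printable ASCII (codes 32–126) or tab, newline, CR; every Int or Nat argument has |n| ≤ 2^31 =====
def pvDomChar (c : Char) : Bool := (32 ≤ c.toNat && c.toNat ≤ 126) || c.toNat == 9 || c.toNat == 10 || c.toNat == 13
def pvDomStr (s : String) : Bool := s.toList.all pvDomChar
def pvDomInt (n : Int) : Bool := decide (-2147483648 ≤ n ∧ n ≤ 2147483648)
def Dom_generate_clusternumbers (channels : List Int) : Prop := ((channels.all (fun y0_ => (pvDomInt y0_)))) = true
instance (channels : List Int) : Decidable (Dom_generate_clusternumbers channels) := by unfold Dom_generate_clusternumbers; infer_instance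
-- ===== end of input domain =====

-- B replaces A's previous-value/counter loop by a two-pass decomposition: group into runs, then emit 1..n per run (alternative, same cost).


-- ===== PORT A =====
-- state = (ch_prev : Option Int, cl_prev : Int, clusters); 'ch == ch_prev' with ch_prev=None is False, hence 'some ch == ch_prev'.
def generate_clusternumbers (channels : List Int) : List Int :=
  (channels.foldl
    (fun (st : Option Int × Int × List Int) ch =>
      match st with
      | (ch_prev, cl_prev, clusters) =>
        if some ch == ch_prev then (some ch, cl_prev + 1, clusters ++ [cl_prev + 1])
        else (some ch, (1 : Int), clusters ++ [(1 : Int)]))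
    (none, 0, [])).2.2

-- ===== PORT B =====
-- Pass 1 of Source B: the runs list is kept reversed (head = the run being extended, i.e. Python's runs[-1]).
def generate_clusternumbers_alt (channels : List Int) : List Int :=
  let runsRev : List (Int × Int) :=
    channels.foldl
      (fun rs ch =>
        match rs with
        | (c, n) :: rest => if c == ch then (c, n + 1) :: rest else (ch, 1) :: (c, n) :: rest
        | [] => [(ch, 1)])
      []
  -- Pass 2 of Source B: out.extend(range(1, n+1)) per run, in input order.
  runsRev.reverse.foldl (fun out p => out ++ PySem.List.pyRange 1 (p.2 + 1) 1) []

-- ===== PRECONDITION & SPEC =====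
def Spec_generate_clusternumbers (channels : List Int) (out : List Int) : Prop := out = generate_clusternumbers_alt channels
instance (channels : List Int) (out : List Int) : Decidable (Spec_generate_clusternumbers channels out) := by unfold Spec_generate_clusternumbers; infer_instance

-- ===== CLAIM (what is proved, stated in full; the proofs are below) =====
def Claim_equal_generate_clusternumbers : Prop := ∀ (channels : List Int), Dom_generate_clusternumbers channels → Spec_generate_clusternumbers channels (generate_clusternumbers channels)

-- ===== LEMMAS AND PROOFS =====

-- the emission of an (in-order) runs list
def pvEmit (rs : List (Int × Int)) : List Int :=
  rs.flatMap (fun p => PySem.List.pyRange 1 (p.2 + 1) 1)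

-- A's previous-channel / counter state read off B's reversed runs list
def pvPrev : List (Int × Int) → Option Int
  | [] => none
  | (c, _) :: _ => some c

def pvCl : List (Int × Int) → Int
  | [] => 0
  | (_, n) :: _ => n

lemma pvEmit_append (l : List (Int × Int)) (p : Int × Int) :
    pvEmit (l ++ [p]) = pvEmit l ++ PySem.List.pyRange 1 (p.2 + 1) 1 := by
  simp [pvEmit]

lemma pvEmit_snoc_one (l : List (Int × Int)) (c : Int) :
    pvEmit (l ++ [(c, 1)]) = pvEmit l ++ [1] := by
  rw [pvEmit_append]
  congr 1

lemma pvEmit_snoc_succ (l : List (Int × Int)) (c n : Int) (hn : 1 ≤ n) :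
    pvEmit (l ++ [(c, n + 1)]) = pvEmit (l ++ [(c, n)]) ++ [n + 1] := by
  rw [pvEmit_append, pvEmit_append, List.append_assoc]
  congr 1
  exact PySem.List.pyRange_one_succ_right (by omega)

-- the loop invariant: A's fold and B's pass-1 fold stay in lockstep
lemma pv_inv (xs : List Int) : ∀ (s : List (Int × Int)) (out : List Int),
    (∀ p ∈ s, 1 ≤ p.2) →
    out = pvEmit s.reverse →
    (xs.foldl
      (fun (st : Option Int × Int × List Int) ch =>
        match st with
        | (ch_prev, cl_prev, clusters) =>
          if some ch == ch_prev then (some ch, cl_prev + 1, clusters ++ [cl_prev + 1])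
          else (some ch, (1 : Int), clusters ++ [(1 : Int)]))
      (pvPrev s, pvCl s, out)).2.2
    = pvEmit (xs.foldl
        (fun rs ch =>
          match rs with
          | (c, n) :: rest => if c == ch then (c, n + 1) :: rest else (ch, 1) :: (c, n) :: rest
          | [] => [(ch, 1)])
        s).reverse := by
  induction xs with
  | nil => intro s out _ hout; simpa [List.foldl] using hout
  | cons ch xs ih =>
    intro s out hpos hout
    match s with
    | [] =>
      simp only [List.foldl, pvPrev, pvCl]
      rw [show (some ch == (none : Option Int)) = false from rfl]
      simp only [Bool.false_eq_true, if_false]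
      have h := ih [(ch, 1)] (out ++ [1])
        (by intro p hp; simp only [List.mem_singleton] at hp; subst hp; norm_num)
        (by rw [hout]; simpa using (pvEmit_snoc_one [] ch).symm)
      simpa [pvPrev, pvCl] using h
    | (c, n) :: rest =>
      have hn : 1 ≤ n := hpos (c, n) (by simp)
      by_cases hceq : c = ch
      · subst hceq
        simp only [List.foldl, pvPrev, pvCl, beq_self_eq_true, if_pos]
        have h := ih ((c, n + 1) :: rest) (out ++ [n + 1])
          (by
            intro p hp
            rcases List.mem_cons.mp hp with h | h
            · subst h; simp; omega
            · exact hpos p (List.mem_cons_of_mem _ h))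
          (by
            rw [hout]
            simp only [List.reverse_cons]
            exact (pvEmit_snoc_succ rest.reverse c n hn).symm)
        simpa [pvPrev, pvCl] using h
      · have hb : (c == ch) = false := by simp [hceq]
        have hb' : (some ch == some c) = false := by simp [Ne.symm hceq]
        simp only [List.foldl, pvPrev, pvCl, hb, hb', Bool.false_eq_true, if_false]
        have h := ih ((ch, 1) :: (c, n) :: rest) (out ++ [1])
          (by
            intro p hp
            rcases List.mem_cons.mp hp with h | h
            · subst h; norm_num
            · exact hpos p h)
          (by
            rw [hout]
            conv_rhs => rw [List.reverse_cons]
            exact (pvEmit_snoc_one _ ch).symm)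
        simpa [pvPrev, pvCl] using h

lemma alt_eq_emit (channels : List Int) :
    generate_clusternumbers_alt channels
      = pvEmit ((channels.foldl
          (fun rs ch =>
            match rs with
            | (c, n) :: rest => if c == ch then (c, n + 1) :: rest else (ch, 1) :: (c, n) :: rest
            | [] => [(ch, 1)])
          []).reverse) := by
  unfold generate_clusternumbers_alt pvEmit
  rw [PySem.List.foldl_append_eq_flatMap]
  simp

-- ===== VERDICT (by name: the statement is the Claim_ definition above) =====
theorem generate_clusternumbers_spec : Claim_equal_generate_clusternumbers := by
  intro channels _
  unfold Spec_generate_clusternumbers generate_clusternumbers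
  rw [alt_eq_emit]
  have h := pv_inv channels [] [] (by simp) (by simp [pvEmit])
  simpa [pvPrev, pvCl] using h
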